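-- pv_equiv track=rewrite | github.com/IvanDzanija/competitive_programming | EverybodyCodes/2024/quest16.py | part2
-- ===== SOURCE A (Python) =====
-- def part2(g):
--     loops = 202420242024
--     turns = list(map(int, g[0].split(",")))
--     d = [[] for _ in range(len(turns))]
--     for x in g[2:]:
--         for i in range(len(turns)):
--             curr = x[i * 4 : i * 4 + 3]
--             if curr != "   " and curr != "":
--                 d[i].append(curr)
--     ans = 0
--     pos = [0] * len(turns)
--
--     visited = set()
--     seen = 0
--     while seen < loops:
--         curr = ""
--         for j in range(len(pos)):
--             pos[j] += turns[j]
--             pos[j] %= len(d[j])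
--             curr += d[j][pos[j]][0]
--             curr += d[j][pos[j]][2]
--         if tuple(pos) in visited:
--             break
--         visited.add(tuple(pos))
--         vis = set()
--         for x in curr:
--             if x in vis:
--                 continue
--             vis.add(x)
--             cnt = curr.count(x)
--             ans += max(0, cnt - 2)
--         seen += 1
--     ans *= loops // seen
--     looped = seen * (loops // seen)
--
--     rem = loops - looped
--     for j in range(len(turns)):
--         pos[j] = turns[j] * looped
--         pos[j] %= len(d[j])
--
--     for i in range(rem):
--         curr = ""
--         for j in range(len(pos)):
--             pos[j] += turns[j]
--             pos[j] %= len(d[j])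
--             curr += d[j][pos[j]][0]
--             curr += d[j][pos[j]][2]
--         vis = set()
--         for x in curr:
--             if x in vis:
--                 continue
--             vis.add(x)
--             cnt = curr.count(x)
--             ans += max(0, cnt - 2)
--
--     return ans
-- ===== SOURCE B (Python) =====
-- def part2(g):
--     loops = 202420242024
--     turns = [int(t) for t in g[0].split(",")]
--     wheels = [[slot for slot in (row[i * 4 : i * 4 + 3] for row in g[2:])
--                if slot != "   " and slot != ""]
--               for i in range(len(turns))]
--
--     def gcd(a, b):
--         return a if b == 0 else gcd(b, a % b)
--
--     # closed-form common period of the whole machine: lcm over wheels of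
--     # len(w) // gcd(turn, len(w)) (each is the period of one wheel's pointer)
--     period = 1
--     for t, w in zip(turns, wheels):
--         p = len(w) // gcd(t, len(w))
--         period = period * p // gcd(period, p)
--
--     steps = min(period, loops)
--     q, r = divmod(loops, steps)
--     cycle_sum = 0
--     prefix = 0
--     for k in range(1, steps + 1):
--         # state after k pulls, in closed form: wheel j shows slot turns[j]*k % len
--         cnt = {}
--         for t, w in zip(turns, wheels):
--             s = w[t * k % len(w)]
--             for c in (s[0], s[2]):
--                 cnt[c] = cnt.get(c, 0) + 1
--         sc = sum(v - 2 for v in cnt.values() if v > 2)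
--         cycle_sum += sc
--         if k <= r:
--             prefix += sc
--     return q * cycle_sum + prefix
-- ===== Notes on version B (the rewrite author's own statement) =====
-- stated objective: alternative
-- what changed: Drops A's visited-set cycle detection, mutable position vector and duplicated remainder loop entirely: B computes a common period of the machine in closed form (lcm over wheels of len(w)//gcd(turn,len(w))), then runs one stateless pass over k=1..min(period,loops) reading each wheel's slot directly as w[turn*k % len(w)], accumulating the full-cycle sum and the first loops%period prefix sum in the same pass, and returns q*cycle_sum+prefix.
-- outside the precondition, e.g. on part2(['2', '', 'ABC', 'D']): A returns 0, B returns 0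
import Mathlib
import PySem

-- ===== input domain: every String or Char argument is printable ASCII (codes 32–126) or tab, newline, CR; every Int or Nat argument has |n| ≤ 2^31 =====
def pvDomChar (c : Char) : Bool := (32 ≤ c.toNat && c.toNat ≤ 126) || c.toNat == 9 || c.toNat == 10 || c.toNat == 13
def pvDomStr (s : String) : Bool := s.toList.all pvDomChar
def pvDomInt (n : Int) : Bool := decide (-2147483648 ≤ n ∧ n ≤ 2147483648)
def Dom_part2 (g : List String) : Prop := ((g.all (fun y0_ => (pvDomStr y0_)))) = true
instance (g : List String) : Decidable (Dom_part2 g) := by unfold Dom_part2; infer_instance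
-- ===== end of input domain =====

-- B drops A's visited-set cycle detection, mutable position vector and duplicated remainder
-- loop: it computes a common period of the machine in closed form (lcm over wheels of
-- len(w)//gcd(turn,len(w))), then makes one stateless pass over k = 1..min(period, loops)
-- reading wheel slots directly as w[turn*k % len(w)]. Objective: alternative.

-- ===== PORT A =====
-- one body of A's while-loop / remainder-loop: for j in range(len(pos)):
--   pos[j] += turns[j]; pos[j] %= len(d[j]); curr += d[j][pos[j]][0]; curr += d[j][pos[j]][2]
-- (string indexing s[0]/s[2] is ported as toList getD — exact when the slot has ≥ 3 chars,
-- which Pre_part2 guarantees; Python raises IndexError otherwise)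
def stepA (turns : List Int) (d : List (List String)) (pc : List Int × List Char) :
    List Int × List Char :=
  (PySem.List.pyRange 0 (pc.1.length : Int) 1).foldl (fun pc j =>
    let pos := PySem.List.pySetD pc.1 j
      (PySem.Int.mod (PySem.List.pyGetD pc.1 j 0 + PySem.List.pyGetD turns j 0)
        ((PySem.List.pyGetD d j []).length : Int))
    let s := PySem.List.pyGetD (PySem.List.pyGetD d j []) (PySem.List.pyGetD pos j 0) ""
    (pos, pc.2 ++ [s.toList.getD 0 ' ', s.toList.getD 2 ' '])) pc

-- vis = set(); for x in curr: if x in vis: continue; vis.add(x); cnt = curr.count(x); ans += max(0, cnt-2)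
def scoreA (curr : List Char) (ans : Int) : Int :=
  (curr.foldl (fun (va : PySem.Set Char × Int) x =>
    if PySem.Set.contains va.1 x then va
    else (PySem.Set.add va.1 x, va.2 + max 0 ((curr.count x : Int) - 2)))
    (PySem.Set.empty, ans)).2

-- while seen < loops: … ; fuel = loops - seen, so the guard 'seen < loops' is 'fuel > 0'
def loopA (turns : List Int) (d : List (List String)) :
    Nat → List Int → PySem.Set (List Int) → Int → Int → (Int × Int × List Int)
  | 0, pos, _, ans, seen => (ans, seen, pos)
  | fuel+1, pos, visited, ans, seen =>
    let pc := stepA turns d (pos, [])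
    if PySem.Set.contains visited pc.1 then (ans, seen, pc.1)
    else loopA turns d fuel pc.1 (PySem.Set.add visited pc.1) (scoreA pc.2 ans) (seen + 1)

def part2 (g : List String) : Int :=
  let loops : Int := 202420242024
  let turns : List Int := ((PySem.Str.split? (PySem.List.pyGetD g 0 "") ",").getD []).map
    (fun s => (PySem.Int.ofStr? s).getD 0)
  let d0 : List (List String) := List.replicate turns.length []
  let d : List (List String) := (PySem.List.slice g (some 2) none).foldl (fun d x =>
    (PySem.List.pyRange 0 (turns.length : Int) 1).foldl (fun d i =>
      let curr := PySem.Str.slice x (some (i * 4)) (some (i * 4 + 3))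
      if curr ≠ "   " ∧ curr ≠ "" then
        PySem.List.pySetD d i (PySem.List.pyGetD d i [] ++ [curr])
      else d) d) d0
  -- totalization guard (not a branch of A's algorithm): with an empty wheel Python raises
  -- ZeroDivisionError on its first 'pos[j] %= len(d[j])' — those inputs are outside Pre_ and
  -- the guard only keeps the fuelled loop from spinning there; inside Pre_ it is always true
  let ok := (PySem.List.pyRange 0 (turns.length : Int) 1).all
    (fun j => (PySem.List.pyGetD d j []).length != 0)
  let r := if ok then loopA turns d 202420242024 (List.replicate turns.length 0) PySem.Set.empty 0 0
    else (0, 1, List.replicate turns.length 0)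
  let ans := r.1 * PySem.Int.floordiv loops r.2.1
  let looped := r.2.1 * PySem.Int.floordiv loops r.2.1
  let rem := loops - looped
  let pos := (PySem.List.pyRange 0 (turns.length : Int) 1).foldl (fun pos j =>
    PySem.List.pySetD pos j
      (PySem.Int.mod (PySem.List.pyGetD turns j 0 * looped)
        ((PySem.List.pyGetD d j []).length : Int))) r.2.2
  let fin := (PySem.List.pyRange 0 rem 1).foldl (fun (ap : Int × List Int) _i =>
    let pc := stepA turns d (ap.2, [])
    (scoreA pc.2 ap.1, pc.1)) (ans, pos)
  fin.1

-- ===== PORT B =====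
-- Python's % has the divisor's sign and |a % b| < |b| for b ≠ 0 — the measure for B's
-- recursive gcd(a, b) = gcd(b, a % b)
theorem pymod_natAbs_lt (a b : Int) (h : b ≠ 0) :
    (PySem.Int.mod a b).natAbs < b.natAbs := by
  rcases lt_or_gt_of_ne h with hb | hb
  · have h1 := PySem.Int.mod_neg_bounds a hb
    omega
  · have h1 := PySem.Int.mod_nonneg a hb
    have h2 := PySem.Int.mod_lt a hb
    omega

-- def gcd(a, b): return a if b == 0 else gcd(b, a % b)
def pygcd (a b : Int) : Int :=
  if h : b = 0 then a else pygcd b (PySem.Int.mod a b)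
termination_by b.natAbs
decreasing_by exact pymod_natAbs_lt a b h

-- per-step score, stateless: cnt = {}; for t, w in zip(turns, wheels):
--   s = w[t * k % len(w)];  for c in (s[0], s[2]): cnt[c] = cnt.get(c, 0) + 1
-- return sum(v - 2 for v in cnt.values() if v > 2)
def scoreBk (turns : List Int) (wheels : List (List String)) (k : Int) : Int :=
  let cnt : PySem.Dict Char Int := (turns.zip wheels).foldl (fun cnt tw =>
    let s := PySem.List.pyGetD tw.2 (PySem.Int.mod (tw.1 * k) ((tw.2.length : Int))) ""
    [s.toList.getD 0 ' ', s.toList.getD 2 ' '].foldl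
      (fun cnt c => cnt.insert c (cnt.getD c 0 + 1)) cnt) PySem.Dict.empty
  ((cnt.values.filter (fun v => v > 2)).map (fun v => v - 2)).sum

def part2_alt (g : List String) : Int :=
  let loops : Int := 202420242024
  let turns : List Int := ((PySem.Str.split? (PySem.List.pyGetD g 0 "") ",").getD []).map
    (fun s => (PySem.Int.ofStr? s).getD 0)
  let wheels : List (List String) := (PySem.List.pyRange 0 (turns.length : Int) 1).map
    (fun i => ((PySem.List.slice g (some 2) none).map
        (fun row => PySem.Str.slice row (some (i * 4)) (some (i * 4 + 3)))).filter
      (fun slot => slot ≠ "   " && slot ≠ ""))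
  let period : Int := (turns.zip wheels).foldl (fun period tw =>
    let p := PySem.Int.floordiv ((tw.2.length : Int)) (pygcd tw.1 ((tw.2.length : Int)))
    PySem.Int.floordiv (period * p) (pygcd period p)) 1
  let steps : Int := min period loops
  let q := PySem.Int.floordiv loops steps
  let r := PySem.Int.mod loops steps
  let fin := (PySem.List.pyRange 1 (steps + 1) 1).foldl (fun (cp : Int × Int) k =>
    let sc := scoreBk turns wheels k
    (cp.1 + sc, if k ≤ r then cp.2 + sc else cp.2)) ((0 : Int), (0 : Int))
  q * fin.1 + fin.2

-- ===== PRECONDITION & SPEC =====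
def pvTurnStrs (g : List String) : List String :=
  (PySem.Str.split? (PySem.List.pyGetD g 0 "") ",").getD []
def pvWheel (g : List String) (i : Nat) : List String :=
  ((PySem.List.slice g (some 2) none).map
      (fun row => PySem.Str.slice row (some ((i : Int) * 4)) (some ((i : Int) * 4 + 3)))).filter
    (fun slot => slot ≠ "   " && slot ≠ "")

-- Pre_ excludes exactly: an empty g (IndexError on g[0]), a first line whose comma-pieces are
-- not all int()-parsable (ValueError), an empty wheel (ZeroDivisionError on % len), and wheels
-- containing a 1–2 character slot: on such slots A raises IndexError when the rotation reaches
-- them, and merely for uniformity the few inputs whose short slots are never reached (where A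
-- returns, and B returns the same value) are excluded with them.
def Pre_part2 (g : List String) : Prop :=
  g ≠ [] ∧
  (∀ s ∈ pvTurnStrs g, PySem.Int.ofStr? s ≠ none) ∧
  (∀ i < (pvTurnStrs g).length, pvWheel g i ≠ [] ∧ ∀ s ∈ pvWheel g i, PySem.Str.len s = 3)
instance (g : List String) : Decidable (Pre_part2 g) := by unfold Pre_part2; infer_instance

def pvWitness_part2 : List String := ["1,2", "", "ABC DEF", "GHI JKL"]

def Spec_part2 (g : List String) (out : Int) : Prop := out = part2_alt g
instance (g : List String) (out : Int) : Decidable (Spec_part2 g out) := by unfold Spec_part2; infer_instance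

-- ===== CLAIM (what is proved, stated in full; the proofs are below) =====
def Claim_equal_part2 : Prop := ∀ (g : List String), Dom_part2 g → Pre_part2 g → Spec_part2 g (part2 g)

-- ===== LEMMAS AND PROOFS =====

-- abstract step, closed-form state, per-step character string and score
def pvStep (ts : List Int) (W : List (List String)) (pos : List Int) : List Int :=
  (pos.zip (ts.zip W)).map (fun ptw =>
    PySem.Int.mod (ptw.1 + ptw.2.1) ((ptw.2.2.length : Int)))

def pvS (ts : List Int) (W : List (List String)) (k : Nat) : List Int :=
  (ts.zip W).map (fun tw => PySem.Int.mod (tw.1 * (k : Int)) ((tw.2.length : Int)))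

def pvChars (W : List (List String)) (pos : List Int) : List Char :=
  (pos.zip W).flatMap (fun pw =>
    let s := PySem.List.pyGetD pw.2 pw.1 ""
    [s.toList.getD 0 ' ', s.toList.getD 2 ' '])

def pvScVal (l : List Char) : Int :=
  ((PySem.Set.ofList l).map (fun x => max 0 ((l.count x : Int) - 2))).sum

def pvsc (ts : List Int) (W : List (List String)) (k : Nat) : Int :=
  pvScVal (pvChars W (pvS ts W k))

def pvTotal (ts : List Int) (W : List (List String)) (n : Nat) : Int :=
  ((List.range n).map (fun i => pvsc ts W (i + 1))).sum

theorem pvS_length (ts : List Int) (W : List (List String)) (k : Nat) :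
    (pvS ts W k).length = (ts.zip W).length := by
  simp [pvS]
theorem pvStep_S (ts : List Int) (W : List (List String))
    (hpos : ∀ w ∈ W, w ≠ []) (k : Nat) :
    pvStep ts W (pvS ts W k) = pvS ts W (k + 1) := by
  apply List.ext_getElem
  · simp [pvStep, pvS]
  intro i h1 h2
  simp only [pvStep, pvS, List.getElem_map, List.getElem_zip]
  have hi : i < (ts.zip W).length := by simpa [pvS] using h2
  have hiW : i < W.length := by simp [List.length_zip] at hi; omega
  have hL : 0 < ((W[i]'hiW).length : Int) := by
    have := hpos (W[i]'hiW) (List.getElem_mem _)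
    simpa [Int.natCast_pos, List.length_pos_iff] using this
  rw [PySem.Int.mod_eq_emod_of_pos hL, PySem.Int.mod_eq_emod_of_pos hL,
      PySem.Int.mod_eq_emod_of_pos hL]
  push_cast
  rw [Int.add_emod, Int.emod_emod_of_dvd _ dvd_rfl, ← Int.add_emod]
  ring_nf

theorem pvS_sub_dvd (ts : List Int) (W : List (List String)) (a b : Nat)
    (h : pvS ts W a = pvS ts W b) :
    ∀ i, (hit : i < ts.length) → (hi : i < W.length) →
      ((W[i].length : Int)) ∣ ts[i] * ((a : Int) - (b : Int)) := by
  intro i hit hi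
  have hz : i < (pvS ts W a).length := by simp [pvS, List.length_zip]; omega
  have heq := List.getElem_of_eq h hz
  simp only [pvS, List.getElem_map, List.getElem_zip] at heq
  rcases Nat.eq_zero_or_pos (W[i].length) with h0 | hp
  · simp only [h0, Nat.cast_zero, PySem.Int.mod] at heq
    simp only [h0, Nat.cast_zero, zero_dvd_iff]
    simp at heq
    rcases heq with h | h
    · subst h; ring
    · rw [h]; ring
  · have hL : 0 < ((W[i].length : Int)) := by exact_mod_cast hp
    rw [PySem.Int.mod_eq_emod_of_pos hL, PySem.Int.mod_eq_emod_of_pos hL] at heq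
    have hdvd := Int.ModEq.dvd (heq : Int.ModEq _ _ _)
    have h2 : ts[i] * (b:Int) - ts[i] * (a:Int) = -(ts[i] * ((a:Int) - b)) := by ring
    rw [h2] at hdvd
    exact (Int.dvd_neg).mp hdvd

theorem pvS_add_period (ts : List Int) (W : List (List String)) (hpos : ∀ w ∈ W, w ≠ [])
    (d : Nat)
    (hd : ∀ i, (hit : i < ts.length) → (hi : i < W.length) →
      ((W[i].length : Int)) ∣ ts[i] * (d : Int)) (k : Nat) :
    pvS ts W (k + d) = pvS ts W k := by
  apply List.ext_getElem
  · simp [pvS]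
  intro i h1 h2
  have hz : i < (ts.zip W).length := by simpa [pvS] using h1
  have hit : i < ts.length := by simp [List.length_zip] at hz; omega
  have hiW : i < W.length := by simp [List.length_zip] at hz; omega
  simp only [pvS, List.getElem_map, List.getElem_zip]
  have hL : 0 < ((W[i].length : Int)) := by
    have := hpos W[i] (List.getElem_mem _)
    simpa [Int.natCast_pos, List.length_pos_iff] using this
  rw [PySem.Int.mod_eq_emod_of_pos hL, PySem.Int.mod_eq_emod_of_pos hL]
  have hsplit : ts[i] * (((k:Nat)+(d:Nat) : Nat) : Int) = ts[i] * k + ts[i] * d := by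
    push_cast; ring
  have h0 : ts[i] * (d:Int) % (W[i].length : Int) = 0 :=
    Int.emod_eq_zero_of_dvd (hd i hit hiW)
  rw [hsplit, Int.add_emod, h0, add_zero, Int.emod_emod_of_dvd _ dvd_rfl]

theorem pvS_mul_period (ts : List Int) (W : List (List String)) (hpos : ∀ w ∈ W, w ≠ [])
    (m : Nat) (hm : pvS ts W (m + 1) = pvS ts W 1) (c k : Nat) :
    pvS ts W (k + c * m) = pvS ts W k := by
  have hd := pvS_sub_dvd ts W (m + 1) 1 hm
  apply pvS_add_period ts W hpos
  intro i hit hi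
  have := hd i hit hi
  have h2 : ts[i] * ((c * m : Nat) : Int) = (c : Int) * (ts[i] * (((m+1 : Nat):Int) - (1:Nat))) := by
    push_cast; ring
  rw [h2]
  exact Dvd.dvd.mul_left (this) _

theorem pvMem_iff (ts : List Int) (W : List (List String)) (hpos : ∀ w ∈ W, w ≠ [])
    (k : Nat) (hk : 1 ≤ k)
    (hnc : ∀ q, 1 ≤ q → q < k → pvS ts W (q + 1) ≠ pvS ts W 1) :
    (∃ r, 1 ≤ r ∧ r ≤ k ∧ pvS ts W (k + 1) = pvS ts W r) ↔ pvS ts W (k + 1) = pvS ts W 1 := by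
  constructor
  · rintro ⟨r, hr1, hrk, hr⟩
    by_cases hr1' : r = 1
    · subst hr1'; exact hr
    · exfalso
      have hd := pvS_sub_dvd ts W (k + 1) r hr
      set d : Nat := k + 1 - r with hdd
      have hper : pvS ts W (1 + d) = pvS ts W 1 := by
        apply pvS_add_period ts W hpos
        intro i hit hi
        have := hd i hit hi
        have h2 : ts[i] * ((d : Nat) : Int) = ts[i] * (((k+1 : Nat):Int) - (r:Nat)) := by
          have : ((d : Nat) : Int) = ((k+1 : Nat):Int) - (r:Nat) := by omega
          rw [this]
        rw [h2]; exact this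
      have hq : 1 ≤ d ∧ d < k := by omega
      exact hnc d hq.1 hq.2 (by rwa [Nat.add_comm 1 d] at hper)
  · intro h; exact ⟨1, le_refl _, hk, h⟩

theorem scoreA_aux (curr : List Char) (l : List Char) :
    ∀ (vis : PySem.Set Char) (a : Int),
    l.foldl (fun (va : PySem.Set Char × Int) x =>
      if PySem.Set.contains va.1 x then va
      else (PySem.Set.add va.1 x, va.2 + max 0 ((curr.count x : Int) - 2))) (vis, a)
    = (l.foldl PySem.Set.add vis,
        a + (((l.foldl PySem.Set.add vis).map (fun x => max 0 ((curr.count x : Int) - 2))).sum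
          - ((vis.map (fun x => max 0 ((curr.count x : Int) - 2))).sum))) := by
  induction l with
  | nil => intro vis a; simp
  | cons x l ih =>
    intro vis a
    simp only [List.foldl_cons]
    by_cases hc : PySem.Set.contains vis x
    · rw [if_pos hc]
      have hadd : PySem.Set.add vis x = vis := by unfold PySem.Set.add; rw [if_pos hc]
      rw [hadd, ih]
    · rw [if_neg hc]
      have hadd : PySem.Set.add vis x = vis ++ [x] := by unfold PySem.Set.add; rw [if_neg hc]
      rw [hadd, ih]
      simp only [Prod.mk.injEq, List.map_append, List.sum_append, List.map_cons, List.map_nil,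
        List.sum_cons, List.sum_nil]
      exact ⟨trivial, by ring⟩

theorem scoreA_eq (curr : List Char) (ans : Int) : scoreA curr ans = ans + pvScVal curr := by
  rw [scoreA, scoreA_aux]
  simp [pvScVal, PySem.Set.ofList_eq_foldl, PySem.Set.empty]

theorem pvSumFilter (L : List Int) (p : Int → Bool) (f : Int → Int) :
    ((L.filter p).map f).sum = (L.map (fun v => if p v then f v else 0)).sum := by
  induction L with
  | nil => simp
  | cons x l ih =>
    by_cases h : p x <;> simp [List.filter_cons, h, ih]

-- the dict-counter score of a character list is pvScVal of that list
theorem cntScore_eq (l : List Char) :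
    ((((l.foldl (fun (cnt : PySem.Dict Char Int) c => cnt.insert c (cnt.getD c 0 + 1))
        PySem.Dict.empty)).values.filter (fun v => v > 2)).map (fun v => v - 2)).sum
    = pvScVal l := by
  rw [PySem.Dict.foldl_insert_getD_add_one_eq_counter]
  rw [PySem.Dict.values_eq_map_keys _ (PySem.Dict.nodup_keys_counter _) 0,
    PySem.Dict.keys_counter, pvSumFilter, List.map_map, pvScVal]
  apply congrArg List.sum
  apply List.map_congr_left
  intro x hx
  simp only [Function.comp_apply, PySem.Dict.getD_counter, decide_eq_true_eq]
  omega

theorem pvStep_length (ts : List Int) (W : List (List String)) (pos : List Int)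
    (hts : pos.length ≤ ts.length) (hWl : pos.length ≤ W.length) :
    (pvStep ts W pos).length = pos.length := by
  simp [pvStep, List.length_zip]; omega

theorem pvStep_getElem (ts : List Int) (W : List (List String)) (pos : List Int)
    (hts : pos.length ≤ ts.length) (hWl : pos.length ≤ W.length)
    (a : Nat) (ha : a < pos.length) :
    (pvStep ts W pos)[a]'(by rw [pvStep_length ts W pos hts hWl]; exact ha)
      = PySem.Int.mod (pos[a] + ts[a]'(by omega)) (((W[a]'(by omega)).length : Int)) := by
  simp [pvStep, List.getElem_zip]

theorem stepA_fold (ts : List Int) (W : List (List String)) (pos0 : List Int)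
    (hts : pos0.length ≤ ts.length) (hWl : pos0.length ≤ W.length) :
    ∀ (m a : Nat), a + m = pos0.length → ∀ (curr : List Char),
    (PySem.List.pyRange (a : Int) (pos0.length : Int) 1).foldl (fun pc j =>
      let pos := PySem.List.pySetD pc.1 j
        (PySem.Int.mod (PySem.List.pyGetD pc.1 j 0 + PySem.List.pyGetD ts j 0)
          ((PySem.List.pyGetD W j []).length : Int))
      let s := PySem.List.pyGetD (PySem.List.pyGetD W j []) (PySem.List.pyGetD pos j 0) ""
      (pos, pc.2 ++ [s.toList.getD 0 ' ', s.toList.getD 2 ' ']))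
      ((pvStep ts W pos0).take a ++ pos0.drop a, curr)
    = (pvStep ts W pos0,
        curr ++ (((pvStep ts W pos0).zip W).drop a).flatMap (fun pw =>
          let s := PySem.List.pyGetD pw.2 pw.1 ""
          [s.toList.getD 0 ' ', s.toList.getD 2 ' '])) := by
  intro m
  induction m with
  | zero =>
    intro a ha curr
    have h1 : PySem.List.pyRange (a : Int) (pos0.length : Int) 1 = [] :=
      PySem.List.pyRange_one_eq_nil (by omega)
    have hlen := pvStep_length ts W pos0 hts hWl
    have h2 : ((pvStep ts W pos0).zip W).drop a = [] := by
      apply List.drop_eq_nil_of_le; simp [List.length_zip]; omega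
    simp [h1, h2, List.take_of_length_le (show (pvStep ts W pos0).length ≤ a by omega),
      List.drop_eq_nil_of_le (show pos0.length ≤ a by omega)]
  | succ m ih =>
    intro a ha curr
    have halt : a < pos0.length := by omega
    have hlen := pvStep_length ts W pos0 hts hWl
    have h1 : PySem.List.pyRange (a : Int) (pos0.length : Int) 1
        = (a : Int) :: PySem.List.pyRange ((a : Int) + 1) (pos0.length : Int) 1 :=
      PySem.List.pyRange_one_cons (by omega)
    rw [h1, List.foldl_cons]
    set Q := pvStep ts W pos0 with hQ
    have hQl : Q.length = pos0.length := hlen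
    set P := Q.take a ++ pos0.drop a with hP
    have hPlen : P.length = pos0.length := by
      simp [hP, List.length_take, List.length_drop]; omega
    have htake : (Q.take a).length = a := by simp [List.length_take]; omega
    have hPa : PySem.List.pyGetD P ((a : Nat) : Int) 0 = pos0[a] := by
      rw [PySem.List.pyGetD_natCast, List.getD_eq_getElem _ _ (by omega)]
      rw [List.getElem_append_right (by omega)]
      simp [htake, halt]
    have hgts : PySem.List.pyGetD ts ((a : Nat) : Int) 0 = ts[a]'(by omega) := by
      rw [PySem.List.pyGetD_natCast, List.getD_eq_getElem _ _ (by omega)]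
    have hgW : PySem.List.pyGetD W ((a : Nat) : Int) [] = W[a]'(by omega) := by
      rw [PySem.List.pyGetD_natCast, List.getD_eq_getElem _ _ (by omega)]
    have hv : PySem.Int.mod (PySem.List.pyGetD P ((a : Nat) : Int) 0
          + PySem.List.pyGetD ts ((a : Nat) : Int) 0)
          ((PySem.List.pyGetD W ((a : Nat) : Int) []).length : Int)
        = Q[a]'(by omega) := by
      rw [hPa, hgts, hgW]
      exact (pvStep_getElem ts W pos0 hts hWl a halt).symm
    have hdropc : pos0.drop a = pos0[a] :: pos0.drop (a + 1) :=
      List.drop_eq_getElem_cons halt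
    have hset : PySem.List.pySetD P ((a : Nat) : Int) (Q[a]'(by omega))
        = Q.take (a + 1) ++ pos0.drop (a + 1) := by
      rw [PySem.List.pySetD_natCast, hP, hdropc]
      rw [List.set_append, htake, if_neg (lt_irrefl a), Nat.sub_self, List.set_cons_zero]
      rw [List.take_succ, List.getElem?_eq_getElem (show a < Q.length by omega)]
      simp only [Option.toList_some, List.append_assoc, List.cons_append, List.nil_append]
    have hread : PySem.List.pyGetD (Q.take (a + 1) ++ pos0.drop (a + 1)) ((a : Nat) : Int) 0
        = Q[a]'(by omega) := by
      rw [PySem.List.pyGetD_natCast, List.getD_eq_getElem _ _ (by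
        simp [List.length_take, List.length_drop]; omega)]
      rw [List.getElem_append_left (by simp [List.length_take]; omega)]
      rw [List.getElem_take]
    have hzipdrop : ((Q.zip W).drop a)
        = (Q[a]'(by omega), W[a]'(by omega)) :: (Q.zip W).drop (a + 1) := by
      rw [List.drop_eq_getElem_cons (by simp [List.length_zip]; omega)]
      simp [List.getElem_zip]
    show (PySem.List.pyRange ((a : Int) + 1) (pos0.length : Int) 1).foldl _
        (PySem.List.pySetD P ((a : Nat) : Int) _, _) = _
    rw [hv, hset, hread, hgW]
    have hcast : ((a : Int) + 1) = (((a + 1 : Nat)) : Int) := by push_cast; ring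
    rw [hcast]
    rw [ih (a + 1) (by omega)]
    rw [hzipdrop]
    simp [List.flatMap_cons, List.append_assoc]

theorem stepA_eq (ts : List Int) (W : List (List String)) (pos : List Int)
    (hts : pos.length ≤ ts.length) (hWl : pos.length ≤ W.length) :
    stepA ts W (pos, []) = (pvStep ts W pos, pvChars W (pvStep ts W pos)) := by
  exact stepA_fold ts W pos hts hWl pos.length 0 (Nat.zero_add _) []

def pvReset (ts : List Int) (W : List (List String)) (looped : Int) (pos0 : List Int) :
    List Int :=
  (pos0.zip (ts.zip W)).map (fun ptw =>
    PySem.Int.mod (ptw.2.1 * looped) ((ptw.2.2.length : Int)))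

theorem pvS_zero (ts : List Int) (W : List (List String)) (hpos : ∀ w ∈ W, w ≠ []) :
    pvS ts W 0 = List.replicate (ts.zip W).length 0 := by
  apply List.ext_getElem
  · simp [pvS]
  intro i h1 h2
  have hz : i < (ts.zip W).length := by simpa [pvS] using h1
  have hiW : i < W.length := by simp [List.length_zip] at hz; omega
  simp only [pvS, List.getElem_map, List.getElem_zip, List.getElem_replicate]
  have hL : 0 < ((W[i].length : Int)) := by
    have := hpos W[i] (List.getElem_mem _)
    simpa [Int.natCast_pos, List.length_pos_iff] using this
  rw [PySem.Int.mod_eq_emod_of_pos hL]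
  simp

-- A's remainder loop: rem iterations of step-and-score starting from the closed-form state
theorem remA_fold (ts : List Int) (W : List (List String)) (hpos : ∀ w ∈ W, w ≠ [])
    (hl : ts.length = W.length) (r : Nat) : ∀ (t : Nat) (a : Int),
    (PySem.List.pyRange 0 (r : Int) 1).foldl (fun (ap : Int × List Int) _i =>
        let pc := stepA ts W (ap.2, [])
        (scoreA pc.2 ap.1, pc.1)) (a, pvS ts W t)
    = (a + ((List.range r).map (fun i => pvsc ts W (t + i + 1))).sum, pvS ts W (t + r)) := by
  induction r with
  | zero =>
    intro t a
    simp [PySem.List.pyRange_zero_nat]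
  | succ r ih =>
    intro t a
    have hsp : PySem.List.pyRange 0 ((r + 1 : Nat) : Int) 1
        = PySem.List.pyRange 0 (r : Int) 1 ++ [(r : Int)] := by
      have : ((r + 1 : Nat) : Int) = (r : Int) + 1 := by push_cast; ring
      rw [this]
      exact PySem.List.pyRange_one_succ_right (by positivity)
    rw [hsp, List.foldl_append, ih]
    simp only [List.foldl_cons, List.foldl_nil]
    have hlen1 : (pvS ts W (t + r)).length ≤ ts.length := by
      rw [pvS_length, List.length_zip]; omega
    have hlen2 : (pvS ts W (t + r)).length ≤ W.length := by
      rw [pvS_length, List.length_zip]; omega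
    rw [stepA_eq ts W _ hlen1 hlen2, pvStep_S ts W hpos]
    simp only [scoreA_eq, List.range_succ, List.map_append, List.sum_append, List.map_cons,
      List.map_nil, List.sum_cons, List.sum_nil, Prod.mk.injEq, pvsc]
    refine ⟨by ring_nf, by rw [show t + r + 1 = t + (r + 1) by omega]⟩

-- A's reset of pos after the cycle: pos[j] = turns[j] * looped % len(d[j])
theorem resetA_fold (ts : List Int) (W : List (List String)) (looped : Int)
    (pos0 : List Int) (hts : pos0.length ≤ ts.length) (hWl : pos0.length ≤ W.length) :
    ∀ (m a : Nat), a + m = pos0.length →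
    (PySem.List.pyRange (a : Int) (pos0.length : Int) 1).foldl (fun pos j =>
      PySem.List.pySetD pos j
        (PySem.Int.mod (PySem.List.pyGetD ts j 0 * looped)
          ((PySem.List.pyGetD W j []).length : Int)))
      ((pvReset ts W looped pos0).take a ++ pos0.drop a)
    = pvReset ts W looped pos0 := by
  intro m
  induction m with
  | zero =>
    intro a ha
    have h1 : PySem.List.pyRange (a : Int) (pos0.length : Int) 1 = [] :=
      PySem.List.pyRange_one_eq_nil (by omega)
    have hlen : (pvReset ts W looped pos0).length = pos0.length := by
      simp [pvReset, List.length_zip]; omega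
    simp [h1, List.take_of_length_le (show (pvReset ts W looped pos0).length ≤ a by omega),
      List.drop_eq_nil_of_le (show pos0.length ≤ a by omega)]
  | succ m ih =>
    intro a ha
    have halt : a < pos0.length := by omega
    have hlen : (pvReset ts W looped pos0).length = pos0.length := by
      simp [pvReset, List.length_zip]; omega
    have h1 : PySem.List.pyRange (a : Int) (pos0.length : Int) 1
        = (a : Int) :: PySem.List.pyRange ((a : Int) + 1) (pos0.length : Int) 1 :=
      PySem.List.pyRange_one_cons (by omega)
    rw [h1, List.foldl_cons]
    set Q := pvReset ts W looped pos0 with hQ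
    have htake : (Q.take a).length = a := by simp [List.length_take]; omega
    have hgts : PySem.List.pyGetD ts ((a : Nat) : Int) 0 = ts[a]'(by omega) := by
      rw [PySem.List.pyGetD_natCast, List.getD_eq_getElem _ _ (by omega)]
    have hgW : PySem.List.pyGetD W ((a : Nat) : Int) [] = W[a]'(by omega) := by
      rw [PySem.List.pyGetD_natCast, List.getD_eq_getElem _ _ (by omega)]
    have hQa : Q[a]'(by omega) = PySem.Int.mod (ts[a]'(by omega) * looped)
        (((W[a]'(by omega)).length : Int)) := by
      simp [hQ, pvReset, List.getElem_zip]
    have hdropc : pos0.drop a = pos0[a] :: pos0.drop (a + 1) :=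
      List.drop_eq_getElem_cons halt
    have hset : PySem.List.pySetD (Q.take a ++ pos0.drop a) ((a : Nat) : Int)
        (PySem.Int.mod (PySem.List.pyGetD ts ((a : Nat) : Int) 0 * looped)
          ((PySem.List.pyGetD W ((a : Nat) : Int) []).length : Int))
        = Q.take (a + 1) ++ pos0.drop (a + 1) := by
      rw [hgts, hgW, ← hQa, PySem.List.pySetD_natCast, hdropc]
      rw [List.set_append, htake, if_neg (lt_irrefl a), Nat.sub_self, List.set_cons_zero]
      rw [List.take_succ, List.getElem?_eq_getElem (by omega)]
      simp only [Option.toList_some, List.append_assoc, List.cons_append, List.nil_append]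
    rw [hset]
    have hcast : ((a : Int) + 1) = (((a + 1 : Nat)) : Int) := by push_cast; ring
    rw [hcast]
    exact ih (a + 1) (by omega)

-- A's main loop characterised: score sum, step count, loop-exit cause
theorem loops_agree (ts : List Int) (W : List (List String)) (hl : ts.length = W.length)
    (hpos : ∀ w ∈ W, w ≠ []) (fuel : Nat) :
    ∀ (k : Nat) (visited : PySem.Set (List Int)) (ans : Int),
    1 ≤ k →
    (∀ q, 1 ≤ q → q < k → pvS ts W (q + 1) ≠ pvS ts W 1) →
    (∀ x : List Int, visited.contains x = true ↔ ∃ r, 1 ≤ r ∧ r ≤ k ∧ x = pvS ts W r) →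
    ∃ m : Nat, k ≤ m ∧ m ≤ k + fuel ∧
      (loopA ts W fuel (pvS ts W k) visited ans (k : Int)).1
        = ans + ((List.range (m - k)).map (fun i => pvsc ts W (k + i + 1))).sum ∧
      (loopA ts W fuel (pvS ts W k) visited ans (k : Int)).2.1 = (m : Int) ∧
      (loopA ts W fuel (pvS ts W k) visited ans (k : Int)).2.2.length = (ts.zip W).length ∧
      (pvS ts W (m + 1) = pvS ts W 1 ∨ m = k + fuel) ∧
      (∀ q, 1 ≤ q → q < m → pvS ts W (q + 1) ≠ pvS ts W 1) := by
  induction fuel with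
  | zero =>
    intro k visited ans hk hnc hvis
    refine ⟨k, le_refl _, by omega, ?_, ?_, ?_, Or.inr (by omega), hnc⟩
    · simp [loopA, Nat.sub_self]
    · simp [loopA]
    · simp [loopA, pvS_length]
  | succ fuel ih =>
    intro k visited ans hk hnc hvis
    have hlen1 : (pvS ts W k).length ≤ ts.length := by
      rw [pvS_length, List.length_zip]; omega
    have hlen2 : (pvS ts W k).length ≤ W.length := by
      rw [pvS_length, List.length_zip]; omega
    have hstep := stepA_eq ts W (pvS ts W k) hlen1 hlen2
    rw [pvStep_S ts W hpos] at hstep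
    have hmem : (visited.contains (pvS ts W (k + 1)) = true) ↔ pvS ts W (k + 1) = pvS ts W 1 := by
      rw [hvis]
      exact pvMem_iff ts W hpos k hk hnc
    by_cases hcl : pvS ts W (k + 1) = pvS ts W 1
    · -- the loop breaks at this step
      refine ⟨k, le_refl _, by omega, ?_, ?_, ?_, Or.inl hcl, hnc⟩
      · rw [loopA, hstep]
        simp only [if_pos (hmem.mpr hcl)]
        simp [Nat.sub_self]
      · rw [loopA, hstep]
        simp only [if_pos (hmem.mpr hcl)]
      · rw [loopA, hstep]
        simp only [if_pos (hmem.mpr hcl)]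
        simp [pvS_length]
    · -- the loop continues
      have hnc' : ∀ q, 1 ≤ q → q < k + 1 → pvS ts W (q + 1) ≠ pvS ts W 1 := by
        intro q h1 h2
        rcases Nat.lt_or_ge q k with h | h
        · exact hnc q h1 h
        · have : q = k := by omega
          subst this; exact hcl
      have hvis' : ∀ x : List Int, ((visited.add (pvS ts W (k + 1))).contains x = true)
          ↔ ∃ r, 1 ≤ r ∧ r ≤ k + 1 ∧ x = pvS ts W r := by
        intro x
        rw [PySem.Set.contains_iff, PySem.Set.mem_add, ← PySem.Set.contains_iff, hvis]
        constructor
        · rintro (⟨r, h1, h2, h3⟩ | h)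
          · exact ⟨r, h1, by omega, h3⟩
          · exact ⟨k + 1, by omega, le_refl _, h⟩
        · rintro ⟨r, h1, h2, h3⟩
          rcases Nat.lt_or_ge r (k + 1) with h | h
          · exact Or.inl ⟨r, h1, by omega, h3⟩
          · have : r = k + 1 := by omega
            subst this; exact Or.inr h3
      obtain ⟨m, hm1, hm2, hA1, hA2, hA3, hdisj, hncm⟩ :=
        ih (k + 1) (visited.add (pvS ts W (k + 1)))
          (scoreA (pvChars W (pvS ts W (k + 1))) ans) (by omega) hnc' hvis'
      have hcast1 : ((k : Int) + 1) = (((k + 1 : Nat)) : Int) := by push_cast; ring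
      have hsum : pvScVal (pvChars W (pvS ts W (k + 1)))
            + ((List.range (m - (k + 1))).map (fun i => pvsc ts W (k + 1 + i + 1))).sum
          = ((List.range (m - k)).map (fun i => pvsc ts W (k + i + 1))).sum := by
        rw [show m - k = (m - (k + 1)) + 1 by omega, List.range_succ_eq_map]
        simp only [List.map_cons, List.sum_cons, List.map_map]
        congr 1
        apply congrArg List.sum
        apply List.map_congr_left
        intro i _
        simp only [Function.comp_apply, Nat.succ_eq_add_one]
        rw [show k + 1 + i + 1 = k + (i + 1) + 1 by omega]
      have hnb : ¬ (visited.contains (pvS ts W (k + 1)) = true) := by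
        rw [hmem]; exact hcl
      refine ⟨m, by omega, by omega, ?_, ?_, ?_,
        hdisj.imp id (fun h => by omega), hncm⟩
      · rw [loopA, hstep]
        simp only [if_neg hnb]
        rw [hcast1, hA1, scoreA_eq, ← hsum]
        ring_nf
      · rw [loopA, hstep]
        simp only [if_neg hnb]
        rw [hcast1, hA2]
      · rw [loopA, hstep]
        simp only [if_neg hnb]
        rw [hcast1, hA3]

def pvSlot (x : String) (i : Int) : String :=
  PySem.Str.slice x (some (i * 4)) (some (i * 4 + 3))

def pvRowAdd (x : String) (i : Int) : List String :=
  if pvSlot x i ≠ "   " ∧ pvSlot x i ≠ "" then [pvSlot x i] else []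

theorem innerBuild (x : String) (n : Nat) :
    ∀ (m a : Nat), a + m = n → ∀ d : List (List String), d.length = n →
    (PySem.List.pyRange (a : Int) (n : Int) 1).foldl (fun d i =>
      let curr := PySem.Str.slice x (some (i * 4)) (some (i * 4 + 3))
      if curr ≠ "   " ∧ curr ≠ "" then
        PySem.List.pySetD d i (PySem.List.pyGetD d i [] ++ [curr])
      else d) d
    = (List.range n).map (fun i => d.getD i [] ++ if a ≤ i then pvRowAdd x (i : Int) else []) := by
  intro m
  induction m with
  | zero =>
    intro a ha d hd
    rw [PySem.List.pyRange_one_eq_nil (by omega), List.foldl_nil]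
    apply List.ext_getElem
    · simp [hd]
    intro i h1 h2
    simp only [List.getElem_map, List.getElem_range]
    rw [if_neg (by simp at h2 ⊢; omega)]
    rw [List.getD_eq_getElem _ _ (by simp at h2; omega)]
    simp
  | succ m ih =>
    intro a ha d hd
    have halt : a < n := by omega
    rw [PySem.List.pyRange_one_cons (by omega), List.foldl_cons]
    have hcast : ((a : Int) + 1) = (((a + 1 : Nat)) : Int) := by push_cast; ring
    by_cases hc : pvSlot x (a : Int) ≠ "   " ∧ pvSlot x (a : Int) ≠ ""
    · have hstep : (let curr := PySem.Str.slice x (some ((a : Int) * 4)) (some ((a : Int) * 4 + 3))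
          if curr ≠ "   " ∧ curr ≠ "" then
            PySem.List.pySetD d ((a : Nat) : Int) (PySem.List.pyGetD d ((a : Nat) : Int) [] ++ [curr])
          else d)
          = d.set a (d.getD a [] ++ [pvSlot x (a : Int)]) := by
        show (if pvSlot x (a : Int) ≠ "   " ∧ pvSlot x (a : Int) ≠ "" then
            PySem.List.pySetD d ((a : Nat) : Int)
              (PySem.List.pyGetD d ((a : Nat) : Int) [] ++ [pvSlot x (a : Int)]) else d) = _
        rw [if_pos hc, PySem.List.pySetD_natCast, PySem.List.pyGetD_natCast]
      rw [hstep, hcast, ih (a + 1) (by omega) _ (by simp [hd])]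
      apply List.map_congr_left
      intro i hi
      have hin : i < n := List.mem_range.mp hi
      have hget : (d.set a (d.getD a [] ++ [pvSlot x (a : Int)])).getD i []
          = if i = a then d.getD a [] ++ [pvSlot x (a : Int)] else d.getD i [] := by
        rw [List.getD_eq_getElem _ _ (by simp [hd]; omega), List.getElem_set]
        by_cases h : i = a
        · rw [if_pos (by omega : a = i), if_pos h]
        · rw [if_neg (by omega : ¬ a = i), if_neg h]
          exact (List.getD_eq_getElem _ _ (by simp [hd]; omega)).symm
      rw [hget]
      by_cases h : i = a
      · subst h
        rw [if_pos rfl, if_neg (by omega : ¬ i + 1 ≤ i), if_pos (le_refl i)]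
        rw [pvRowAdd, if_pos hc]
        simp
      · rw [if_neg h]
        by_cases hle : a ≤ i
        · rw [if_pos (by omega : a + 1 ≤ i), if_pos hle]
        · rw [if_neg (by omega : ¬ a + 1 ≤ i), if_neg hle]
    · have hstep : (let curr := PySem.Str.slice x (some ((a : Int) * 4)) (some ((a : Int) * 4 + 3))
          if curr ≠ "   " ∧ curr ≠ "" then
            PySem.List.pySetD d ((a : Nat) : Int) (PySem.List.pyGetD d ((a : Nat) : Int) [] ++ [curr])
          else d) = d := by
        show (if pvSlot x (a : Int) ≠ "   " ∧ pvSlot x (a : Int) ≠ "" then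
            PySem.List.pySetD d ((a : Nat) : Int)
              (PySem.List.pyGetD d ((a : Nat) : Int) [] ++ [pvSlot x (a : Int)]) else d) = _
        rw [if_neg hc]
      rw [hstep, hcast, ih (a + 1) (by omega) d hd]
      apply List.map_congr_left
      intro i hi
      have hin : i < n := List.mem_range.mp hi
      by_cases h : i = a
      · subst h
        rw [if_neg (by omega : ¬ i + 1 ≤ i), if_pos (le_refl i)]
        rw [pvRowAdd, if_neg hc]
      · by_cases hle : a ≤ i
        · rw [if_pos (by omega : a + 1 ≤ i), if_pos hle]
        · rw [if_neg (by omega : ¬ a + 1 ≤ i), if_neg hle]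

theorem innerBuild0 (x : String) (n : Nat) (d : List (List String)) (hd : d.length = n) :
    (PySem.List.pyRange 0 (n : Int) 1).foldl (fun d i =>
      let curr := PySem.Str.slice x (some (i * 4)) (some (i * 4 + 3))
      if curr ≠ "   " ∧ curr ≠ "" then
        PySem.List.pySetD d i (PySem.List.pyGetD d i [] ++ [curr])
      else d) d
    = (List.range n).map (fun i => d.getD i [] ++ pvRowAdd x (i : Int)) := by
  have h := innerBuild x n n 0 (Nat.zero_add n) d hd
  simpa using h

theorem rowsBuild (n : Nat) : ∀ (rows : List String) (d : List (List String)), d.length = n →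
    rows.foldl (fun d x =>
      (PySem.List.pyRange 0 (n : Int) 1).foldl (fun d i =>
        let curr := PySem.Str.slice x (some (i * 4)) (some (i * 4 + 3))
        if curr ≠ "   " ∧ curr ≠ "" then
          PySem.List.pySetD d i (PySem.List.pyGetD d i [] ++ [curr])
        else d) d) d
    = (List.range n).map (fun i =>
        d.getD i [] ++ (rows.map (fun x => pvRowAdd x (i : Int))).flatten) := by
  intro rows
  induction rows with
  | nil =>
    intro d hd
    apply List.ext_getElem
    · simp [hd]
    intro i h1 h2
    simp only [List.getElem_map, List.getElem_range, List.map_nil, List.flatten_nil,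
      List.append_nil]
    exact (List.getD_eq_getElem _ _ (by omega)).symm
  | cons x rows ih =>
    intro d hd
    rw [List.foldl_cons, innerBuild0 x n d hd, ih _ (by simp)]
    apply List.map_congr_left
    intro i hi
    have hin : i < n := List.mem_range.mp hi
    rw [List.getD_eq_getElem _ _ (by simp; omega)]
    simp only [List.getElem_map, List.getElem_range]
    simp [List.append_assoc]

theorem flatten_eq_filter (i : Int) : ∀ (rows : List String),
    ((rows.map (fun x => pvRowAdd x i))).flatten
    = ((rows.map (fun row => PySem.Str.slice row (some (i * 4)) (some (i * 4 + 3)))).filter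
        (fun slot => slot ≠ "   " && slot ≠ "")) := by
  intro rows
  induction rows with
  | nil => simp
  | cons x rows ih =>
    simp only [List.map_cons, List.flatten_cons, List.filter_cons, ih]
    by_cases hc : pvSlot x i ≠ "   " ∧ pvSlot x i ≠ ""
    · rw [pvRowAdd, if_pos hc]
      have hb : ((PySem.Str.slice x (some (i * 4)) (some (i * 4 + 3)) ≠ "   ") &&
          (PySem.Str.slice x (some (i * 4)) (some (i * 4 + 3)) ≠ "")) = true := by
        simp only [pvSlot] at hc
        simp [hc.1, hc.2]
      rw [hb]
      simp [pvSlot]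
    · rw [pvRowAdd, if_neg hc]
      rcases not_and_or.mp hc with h | h
      · have h' : PySem.Str.slice x (some (i * 4)) (some (i * 4 + 3)) = "   " := by
          simpa [pvSlot] using h
        simp [h']
      · have h' : PySem.Str.slice x (some (i * 4)) (some (i * 4 + 3)) = "" := by
          simpa [pvSlot] using h
        simp [h']

theorem wheels_eq (rows : List String) (n : Nat) :
    rows.foldl (fun d x =>
      (PySem.List.pyRange 0 (n : Int) 1).foldl (fun d i =>
        let curr := PySem.Str.slice x (some (i * 4)) (some (i * 4 + 3))
        if curr ≠ "   " ∧ curr ≠ "" then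
          PySem.List.pySetD d i (PySem.List.pyGetD d i [] ++ [curr])
        else d) d) (List.replicate n [])
    = (PySem.List.pyRange 0 (n : Int) 1).map (fun i =>
        ((rows.map (fun row => PySem.Str.slice row (some (i * 4)) (some (i * 4 + 3)))).filter
          (fun slot => slot ≠ "   " && slot ≠ ""))) := by
  rw [rowsBuild n rows _ (by simp)]
  apply List.ext_getElem
  · simp [PySem.List.length_pyRange_one]
  intro i h1 h2
  have hin : i < n := by simpa using h1
  simp only [List.getElem_map, List.getElem_range]
  rw [PySem.List.getElem_pyRange_one]
  rw [List.getD_eq_getElem _ _ (by simp [hin]), List.getElem_replicate]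
  rw [List.nil_append, flatten_eq_filter]
  simp

theorem resetA_fold0 (ts : List Int) (W : List (List String)) (looped : Int)
    (pos0 : List Int) (hts : pos0.length ≤ ts.length) (hWl : pos0.length ≤ W.length) :
    (PySem.List.pyRange 0 (pos0.length : Int) 1).foldl (fun pos j =>
      PySem.List.pySetD pos j
        (PySem.Int.mod (PySem.List.pyGetD ts j 0 * looped)
          ((PySem.List.pyGetD W j []).length : Int))) pos0
    = pvReset ts W looped pos0 := by
  have h := resetA_fold ts W looped pos0 hts hWl pos0.length 0 (Nat.zero_add _)
  simpa using h

theorem pvReset_eq_pvS (ts : List Int) (W : List (List String)) (pos0 : List Int)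
    (hp : pos0.length = (ts.zip W).length) (looped : Int) (lpN : Nat)
    (hl : looped = (lpN : Int)) :
    pvReset ts W looped pos0 = pvS ts W lpN := by
  have hp' := hp
  simp only [List.length_zip] at hp'
  apply List.ext_getElem
  · simp [pvReset, pvS, List.length_zip]; omega
  intro i h1 h2
  have hz : i < (ts.zip W).length := by simpa [pvS, List.length_zip] using h2
  have hzp : i < (pos0.zip (ts.zip W)).length := by
    simp [List.length_zip] at hz ⊢; omega
  simp only [pvReset, pvS, List.getElem_map, List.getElem_zip, hl]

theorem scoresShape (ts : List Int) (W : List (List String)) (m : Nat) (hm : 1 ≤ m) :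
    [pvsc ts W 1] ++ (List.range (m - 1)).map (fun i => pvsc ts W (1 + i + 1))
    = (List.range m).map (fun i => pvsc ts W (i + 1)) := by
  rw [show m = (m - 1) + 1 by omega, List.range_succ_eq_map]
  simp only [List.map_cons, List.map_map, List.cons_append, List.nil_append,
    Nat.add_sub_cancel]
  congr 1
  apply List.map_congr_left
  intro i _
  simp only [Function.comp_apply, Nat.succ_eq_add_one]
  rw [show i + 1 + 1 = 1 + i + 1 by omega]

-- ---------- B-side lemmas ----------

theorem gcd_emod (a b : Int) : Int.gcd b (a % b) = Int.gcd a b := by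
  conv_rhs => rw [Int.gcd_comm]
  conv_rhs => rw [show a = a % b + b * (a / b) from by rw [Int.emod_def]; ring]
  exact (Int.gcd_add_mul_left_right b (a % b) (a / b)).symm

theorem pygcd_eq_of_nonneg (n : Nat) : ∀ a b : Int, b.toNat ≤ n → 0 ≤ a → 0 ≤ b →
    pygcd a b = (Int.gcd a b : Int) := by
  induction n with
  | zero =>
    intro a b hb ha hb0
    have : b = 0 := by omega
    subst this
    rw [pygcd, dif_pos rfl, Int.gcd_zero_right, Int.natAbs_of_nonneg ha]
  | succ n ih =>
    intro a b hb ha hb0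
    by_cases h0 : b = 0
    · subst h0
      rw [pygcd, dif_pos rfl, Int.gcd_zero_right, Int.natAbs_of_nonneg ha]
    · have hbp : 0 < b := lt_of_le_of_ne hb0 (Ne.symm h0)
      rw [pygcd, dif_neg h0, PySem.Int.mod_eq_emod_of_pos hbp]
      have h1 : 0 ≤ a % b := Int.emod_nonneg a h0
      have h2 : a % b < b := Int.emod_lt_of_pos a hbp
      rw [ih b (a % b) (by omega) hb0 h1]
      rw [gcd_emod]

theorem pygcd_eq (t L : Int) (hL : 0 < L) : pygcd t L = (Int.gcd t L : Int) := by
  rw [pygcd, dif_neg (by omega : ¬ L = 0), PySem.Int.mod_eq_emod_of_pos hL]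
  have h1 : 0 ≤ t % L := Int.emod_nonneg t (by omega)
  rw [pygcd_eq_of_nonneg (t % L).toNat L (t % L) (le_refl _) (by omega) h1]
  rw [gcd_emod]

theorem one_le_ediv_of_dvd (x gd : Int) (hg : 0 < gd) (hx : 1 ≤ x) (hd : gd ∣ x) :
    1 ≤ x / gd := by
  obtain ⟨u, rfl⟩ := hd
  rw [Int.mul_ediv_cancel_left _ (by omega : gd ≠ 0)]
  nlinarith

-- the accumulated period stays positive, is a multiple of every earlier accumulator,
-- and absorbs every processed wheel's per-wheel period
theorem period_fold (l : List (Int × List String)) (hne : ∀ tw ∈ l, tw.2 ≠ []) :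
    ∀ a : Int, 1 ≤ a →
    (1 ≤ l.foldl (fun period tw =>
        let p := PySem.Int.floordiv ((tw.2.length : Int)) (pygcd tw.1 ((tw.2.length : Int)))
        PySem.Int.floordiv (period * p) (pygcd period p)) a) ∧
    (a ∣ l.foldl (fun period tw =>
        let p := PySem.Int.floordiv ((tw.2.length : Int)) (pygcd tw.1 ((tw.2.length : Int)))
        PySem.Int.floordiv (period * p) (pygcd period p)) a) ∧
    (∀ tw ∈ l, ((tw.2.length : Int)) ∣ tw.1 * l.foldl (fun period tw =>
        let p := PySem.Int.floordiv ((tw.2.length : Int)) (pygcd tw.1 ((tw.2.length : Int)))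
        PySem.Int.floordiv (period * p) (pygcd period p)) a) := by
  induction l with
  | nil =>
    intro a ha
    exact ⟨ha, dvd_rfl, by simp⟩
  | cons tw l ihl =>
    intro a ha
    have hLpos : (0 : Int) < ((tw.2.length : Int)) := by
      have := hne tw (List.mem_cons_self)
      simpa [Int.natCast_pos, List.length_pos_iff] using this
    set L : Int := ((tw.2.length : Int)) with hLdef
    have hg := pygcd_eq tw.1 L hLpos
    set g1 : Int := ((Int.gcd tw.1 L : Nat) : Int) with hg1def
    have hgpos : (0 : Int) < g1 := by
      rw [hg1def]
      exact_mod_cast Int.gcd_pos_of_ne_zero_right tw.1 (by omega : L ≠ 0)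
    have hgdL : g1 ∣ L := Int.gcd_dvd_right tw.1 L
    have hgdt : g1 ∣ tw.1 := Int.gcd_dvd_left tw.1 L
    set p : Int := PySem.Int.floordiv L (pygcd tw.1 L) with hpdef
    have hpe : p = L / g1 := by
      rw [hpdef, hg, PySem.Int.floordiv_eq_ediv_of_pos hgpos]
    have hp1 : 1 ≤ p := by
      rw [hpe]
      exact one_le_ediv_of_dvd L _ hgpos (by omega) hgdL
    have hLtp : L ∣ tw.1 * p := by
      obtain ⟨u, hu⟩ := hgdt
      rw [hpe, hu, show g1 * u * (L / g1) = u * (g1 * (L / g1)) from by ring,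
        Int.mul_ediv_cancel' hgdL]
      exact dvd_mul_left L u
    set g2 : Int := pygcd a p with hg2def
    have hg2e : g2 = (Int.gcd a p : Int) := pygcd_eq a p (by omega)
    have hg2pos : (0 : Int) < g2 := by
      rw [hg2e]
      exact_mod_cast Int.gcd_pos_of_ne_zero_right a (by omega : p ≠ 0)
    have hg2a : g2 ∣ a := by rw [hg2e]; exact Int.gcd_dvd_left a p
    have hg2p : g2 ∣ p := by rw [hg2e]; exact Int.gcd_dvd_right a p
    set a' : Int := PySem.Int.floordiv (a * p) g2 with ha'def
    have ha'e : a' = a * (p / g2) := by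
      rw [ha'def, PySem.Int.floordiv_eq_ediv_of_pos hg2pos, Int.mul_ediv_assoc a hg2p]
    have ha'e2 : a' = p * (a / g2) := by
      rw [ha'def, PySem.Int.floordiv_eq_ediv_of_pos hg2pos, mul_comm a p,
        Int.mul_ediv_assoc p hg2a]
    have ha'1 : 1 ≤ a' := by
      rw [ha'e]
      have := one_le_ediv_of_dvd p g2 hg2pos hp1 hg2p
      nlinarith
    have hada' : a ∣ a' := ⟨p / g2, ha'e⟩
    have hpda' : p ∣ a' := ⟨a / g2, ha'e2⟩
    obtain ⟨hf1, hf2, hf3⟩ := ihl (fun x hx => hne x (List.mem_cons_of_mem _ hx)) a' ha'1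
    simp only [List.foldl_cons]
    refine ⟨hf1, dvd_trans hada' hf2, ?_⟩
    intro x hx
    rcases List.mem_cons.mp hx with hhd | htl
    · subst hhd
      have hpdF : p ∣ l.foldl _ a' := dvd_trans hpda' hf2
      have : x.1 * p ∣ x.1 * l.foldl (fun period tw =>
          let p := PySem.Int.floordiv ((tw.2.length : Int)) (pygcd tw.1 ((tw.2.length : Int)))
          PySem.Int.floordiv (period * p) (pygcd period p)) a' :=
        mul_dvd_mul_left x.1 (dvd_trans hpda' hf2)
      exact dvd_trans hLtp this
    · exact hf3 x htl

-- closed-form characters produced at step k are exactly the abstract-state characters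
theorem charsB_eq (ts : List Int) (W : List (List String)) (hlen : W.length = ts.length)
    (k : Nat) :
    ((ts.zip W).flatMap (fun tw =>
      let s := PySem.List.pyGetD tw.2
        (PySem.Int.mod (tw.1 * ((k : Nat) : Int)) ((tw.2.length : Int))) ""
      [s.toList.getD 0 ' ', s.toList.getD 2 ' ']))
    = pvChars W (pvS ts W k) := by
  unfold pvChars
  have hzl : ((pvS ts W k).zip W)
      = (ts.zip W).map (fun tw =>
          (PySem.Int.mod (tw.1 * ((k : Nat) : Int)) ((tw.2.length : Int)), tw.2)) := by
    apply List.ext_getElem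
    · simp [pvS, List.length_zip]
    intro i h1 h2
    have hz : i < (ts.zip W).length := by simpa using h2
    have hiW : i < W.length := by simp [List.length_zip] at hz; omega
    simp [pvS, List.getElem_zip]
  rw [hzl, List.flatMap_map]

theorem scoreBk_eq (ts : List Int) (W : List (List String)) (hlen : W.length = ts.length)
    (k : Nat) : scoreBk ts W ((k : Nat) : Int) = pvsc ts W k := by
  unfold scoreBk
  rw [show (fun (cnt : PySem.Dict Char Int) (tw : Int × List String) =>
        let s := PySem.List.pyGetD tw.2
          (PySem.Int.mod (tw.1 * ((k : Nat) : Int)) ((tw.2.length : Int))) ""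
        [s.toList.getD 0 ' ', s.toList.getD 2 ' '].foldl
          (fun cnt c => cnt.insert c (cnt.getD c 0 + 1)) cnt)
      = (fun cnt tw => ((fun tw : Int × List String =>
          let s := PySem.List.pyGetD tw.2
            (PySem.Int.mod (tw.1 * ((k : Nat) : Int)) ((tw.2.length : Int))) ""
          [s.toList.getD 0 ' ', s.toList.getD 2 ' ']) tw).foldl
          (fun cnt c => cnt.insert c (cnt.getD c 0 + 1)) cnt) from rfl]
  rw [← List.foldl_flatMap]
  rw [charsB_eq ts W hlen k]
  exact cntScore_eq _

-- sum of per-step scores over N steps, split at a common period p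
theorem pvTotal_succ (ts : List Int) (W : List (List String)) (n : Nat) :
    pvTotal ts W (n + 1) = pvTotal ts W n + pvsc ts W (n + 1) := by
  unfold pvTotal
  rw [List.range_succ]
  simp

theorem pvTotal_periodic (ts : List Int) (W : List (List String)) (p : Nat) (hp : 1 ≤ p)
    (hper : ∀ k, pvS ts W (k + p) = pvS ts W k) :
    ∀ N, pvTotal ts W N = ((N / p : Nat) : Int) * pvTotal ts W p + pvTotal ts W (N % p) := by
  have hsc : ∀ k, pvsc ts W (k + p) = pvsc ts W k := by
    intro k; unfold pvsc; rw [hper]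
  have hsplit : ∀ M, pvTotal ts W (p + M) = pvTotal ts W p + pvTotal ts W M := by
    intro M
    unfold pvTotal
    rw [List.range_add, List.map_append, List.sum_append]
    congr 1
    rw [List.map_map]
    apply congrArg List.sum
    apply List.map_congr_left
    intro j _
    simp only [Function.comp_apply]
    rw [show p + j + 1 = (j + 1) + p by omega, hsc]
  intro N
  induction N using Nat.strong_induction_on with
  | _ N ih =>
    by_cases hN : N < p
    · rw [Nat.div_eq_of_lt hN, Nat.mod_eq_of_lt hN]
      simp
    · have hple : p ≤ N := le_of_not_gt hN
      have hN2 : pvTotal ts W N = pvTotal ts W p + pvTotal ts W (N - p) := by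
        conv_lhs => rw [show N = p + (N - p) from by omega]
        exact hsplit (N - p)
      rw [hN2, ih (N - p) (by omega)]
      have h1 : N / p = (N - p) / p + 1 := by
        conv_lhs => rw [show N = (N - p) + p by omega]
        rw [Nat.add_div_right _ (by omega : 0 < p)]
      have h2 : N % p = (N - p) % p := by
        conv_lhs => rw [show N = (N - p) + p by omega]
        rw [Nat.add_mod_right]
      rw [h1, h2]
      push_cast
      ring

-- B's main fold accumulates the running total and the prefix total simultaneously
theorem bLoop_eq (ts : List Int) (W : List (List String)) (hlen : W.length = ts.length)
    (r : Int) (hr : 0 ≤ r) (n : Nat) :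
    (PySem.List.pyRange 1 (((n : Nat) : Int) + 1) 1).foldl (fun (cp : Int × Int) k =>
      let sc := scoreBk ts W k
      (cp.1 + sc, if k ≤ r then cp.2 + sc else cp.2)) ((0 : Int), (0 : Int))
    = (pvTotal ts W n, pvTotal ts W (min n r.toNat)) := by
  induction n with
  | zero =>
    rw [PySem.List.pyRange_one_eq_nil (by norm_num)]
    simp [pvTotal]
  | succ n ih =>
    have hsp : PySem.List.pyRange 1 (((n + 1 : Nat) : Int) + 1) 1
        = PySem.List.pyRange 1 (((n : Nat) : Int) + 1) 1 ++ [((n : Nat) : Int) + 1] := by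
      rw [show (((n + 1 : Nat) : Int) + 1) = (((n : Nat) : Int) + 1) + 1 by push_cast; ring]
      exact PySem.List.pyRange_one_succ_right (by omega)
    rw [hsp, List.foldl_append, ih]
    simp only [List.foldl_cons, List.foldl_nil]
    have hscv : scoreBk ts W (((n : Nat) : Int) + 1) = pvsc ts W (n + 1) := by
      rw [show (((n : Nat) : Int) + 1) = (((n + 1 : Nat) : Nat) : Int) by push_cast; ring]
      exact scoreBk_eq ts W hlen (n + 1)
    rw [hscv]
    by_cases hc : ((n : Nat) : Int) + 1 ≤ r
    · rw [if_pos hc]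
      have h1 : min n r.toNat = n := by omega
      have h2 : min (n + 1) r.toNat = n + 1 := by omega
      rw [h1, h2, pvTotal_succ]
    · rw [if_neg hc]
      have h1 : min n r.toNat = r.toNat := by omega
      have h2 : min (n + 1) r.toNat = r.toNat := by omega
      rw [h1, h2, pvTotal_succ]

set_option maxHeartbeats 2000000 in
theorem part2_eq (g : List String) (hpre : Pre_part2 g) : part2 g = part2_alt g := by
  obtain ⟨hg, hints, hwh⟩ := hpre
  simp only [part2, part2_alt]
  rw [wheels_eq]
  set ts : List Int := ((PySem.Str.split? (PySem.List.pyGetD g 0 "") ",").getD []).map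
    (fun s => (PySem.Int.ofStr? s).getD 0) with hts
  set W : List (List String) := (PySem.List.pyRange 0 ((ts.length : Nat) : Int) 1).map
    (fun i => ((PySem.List.slice g (some 2) none).map
        (fun row => PySem.Str.slice row (some (i * 4)) (some (i * 4 + 3)))).filter
      (fun slot => slot ≠ "   " && slot ≠ "")) with hW
  have hlenW : W.length = ts.length := by
    simp [hW, PySem.List.length_pyRange_one]
  have hzl : (ts.zip W).length = ts.length := by
    simp [List.length_zip, hlenW]
  have htlen : ts.length = (pvTurnStrs g).length := by
    simp [hts, pvTurnStrs]
  have hWget : ∀ i : Nat, (h : i < ts.length) → W[i]'(by omega) = pvWheel g i := by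
    intro i h
    simp only [hW, List.getElem_map]
    rw [PySem.List.getElem_pyRange_one]
    simp [pvWheel]
  have hpos : ∀ w ∈ W, w ≠ [] := by
    intro w hwmem
    obtain ⟨i, hi, hgi⟩ := List.mem_iff_getElem.mp hwmem
    have hi' : i < ts.length := by omega
    rw [← hgi, hWget i hi']
    exact (hwh i (by omega)).1
  -- ---------- A's value: pvTotal over the full loop count ----------
  have hA : (let ok := (PySem.List.pyRange 0 (ts.length : Int) 1).all (fun j => (PySem.List.pyGetD W j []).length != 0)
      let r := if ok then loopA ts W 202420242024 (List.replicate ts.length 0) PySem.Set.empty 0 0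
        else (0, 1, List.replicate ts.length 0)
      let ans := r.1 * PySem.Int.floordiv 202420242024 r.2.1
      let looped := r.2.1 * PySem.Int.floordiv 202420242024 r.2.1
      let rem := (202420242024 : Int) - looped
      let pos := (PySem.List.pyRange 0 (ts.length : Int) 1).foldl (fun pos j =>
        PySem.List.pySetD pos j
          (PySem.Int.mod (PySem.List.pyGetD ts j 0 * looped)
            ((PySem.List.pyGetD W j []).length : Int))) r.2.2
      let fin := (PySem.List.pyRange 0 rem 1).foldl (fun (ap : Int × List Int) _i =>
        let pc := stepA ts W (ap.2, [])
        (scoreA pc.2 ap.1, pc.1)) (ans, pos)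
      fin.1) = pvTotal ts W 202420242024 := by
    simp only []
    have hguard : ((PySem.List.pyRange 0 (ts.length : Int) 1).all
        (fun j => (PySem.List.pyGetD W j []).length != 0)) = true := by
      rw [List.all_eq_true]
      intro j hj
      obtain ⟨hj0, hjn⟩ := (PySem.List.mem_pyRange_one).mp hj
      obtain ⟨i, rfl⟩ : ∃ i : Nat, j = (i : Int) := ⟨j.toNat, by omega⟩
      have hit : i < ts.length := by omega
      rw [PySem.List.pyGetD_natCast, List.getD_eq_getElem _ _ (by omega)]
      have := hpos (W[i]'(by omega)) (List.getElem_mem _)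
      simpa [List.length_pos_iff] using this
    rw [if_pos (by rw [hguard])]
    have hrepl : List.replicate ts.length (0 : Int) = pvS ts W 0 := by
      rw [pvS_zero ts W hpos, hzl]
    rw [hrepl]
    -- unroll the first iteration of A's while loop
    rw [show (202420242024 : Nat) = 202420242023 + 1 by norm_num, loopA]
    have hl1 : (pvS ts W 0).length ≤ ts.length := by rw [pvS_length, List.length_zip]; omega
    have hl2 : (pvS ts W 0).length ≤ W.length := by rw [pvS_length, List.length_zip]; omega
    rw [stepA_eq ts W _ hl1 hl2, pvStep_S ts W hpos]
    have hcont : (PySem.Set.empty : PySem.Set (List Int)).contains (pvS ts W (0 + 1)) = false := by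
      simp [PySem.Set.empty, PySem.Set.contains]
    rw [if_neg (by rw [hcont]; exact Bool.false_ne_true)]
    simp only [Nat.zero_add, zero_add]
    have hvis1 : ∀ x : List Int,
        ((PySem.Set.empty.add (pvS ts W 1)).contains x = true)
        ↔ ∃ r, 1 ≤ r ∧ r ≤ 1 ∧ x = pvS ts W r := by
      intro x
      rw [PySem.Set.contains_iff, PySem.Set.mem_add]
      constructor
      · rintro (h | h)
        · exact absurd h (by simp [PySem.Set.empty])
        · exact ⟨1, le_refl _, le_refl _, by simpa using h⟩
      · rintro ⟨r, h1, h2, h3⟩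
        have : r = 1 := by omega
        subst this
        exact Or.inr (by simpa using h3)
    obtain ⟨m, hm1, hm2, hA1, hA2, hA3, hdisj, hncm⟩ :=
      loops_agree ts W hlenW.symm hpos 202420242023 1
        (PySem.Set.empty.add (pvS ts W 1))
        (scoreA (pvChars W (pvS ts W 1)) 0) (le_refl 1) (by omega) (by exact hvis1)
    rw [show ((1 : Nat) : Int) = (1 : Int) by norm_num] at hA1 hA2 hA3
    have hansA : scoreA (pvChars W (pvS ts W 1)) 0
        + ((List.range (m - 1)).map (fun i => pvsc ts W (1 + i + 1))).sum
        = pvTotal ts W m := by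
      rw [scoreA_eq, zero_add, pvTotal, ← scoresShape ts W m hm1]
      simp [pvsc]
    rw [hA1, hA2, hansA]
    have hmpos : (0 : Int) < (m : Int) := by exact_mod_cast hm1
    rw [PySem.Int.floordiv_eq_ediv_of_pos hmpos]
    set q : Int := (202420242024 : Int) / (m : Int) with hq
    have hqnn : 0 ≤ q := Int.ediv_nonneg (by norm_num) (by omega)
    set looped : Int := (m : Int) * q with hlooped
    have hlpnn : 0 ≤ looped := mul_nonneg (by omega) hqnn
    set lpN : Nat := looped.toNat with hlpN
    have hlpc : looped = (lpN : Int) := by omega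
    have hlpmul : lpN = q.toNat * m := by
      have hqq : ((q.toNat : Nat) : Int) = q := Int.toNat_of_nonneg hqnn
      have h1 : looped = ((q.toNat * m : Nat) : Int) := by
        push_cast
        rw [hqq, hlooped]
        ring
      omega
    have hremd : (202420242024 : Int) - looped = (202420242024 : Int) % (m : Int) := by
      rw [hlooped, hq, Int.emod_def]
    have hremnn : 0 ≤ (202420242024 : Int) % (m : Int) := Int.emod_nonneg _ (by omega)
    set remN : Nat := ((202420242024 : Int) % (m : Int)).toNat with hremN
    have hremc : (202420242024 : Int) % (m : Int) = ((remN : Nat) : Int) := by omega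
    have hremle : remN ≤ m := by
      have := Int.emod_lt_of_pos (202420242024 : Int) hmpos
      omega
    set r22 := (loopA ts W 202420242023 (pvS ts W 1) (PySem.Set.empty.add (pvS ts W 1))
        (scoreA (pvChars W (pvS ts W 1)) 0) (1 : Int)).2.2 with hr22
    have hr22len : r22.length = (ts.zip W).length := hA3
    rw [show ((ts.length : Nat) : Int) = ((r22.length : Nat) : Int) by rw [hr22len, hzl]]
    rw [resetA_fold0 ts W looped r22
        (by rw [hr22len, List.length_zip]; omega)
        (by rw [hr22len, List.length_zip]; omega)]
    rw [pvReset_eq_pvS ts W r22 hr22len looped lpN hlpc]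
    rw [hremd, hremc]
    rw [remA_fold ts W hpos hlenW.symm remN lpN (pvTotal ts W m * q)]
    have hLNdm : (202420242024 : Nat) / m = q.toNat := by
      have : ((202420242024 : Nat) : Int) / (m : Int) = q := by
        rw [hq]; norm_num
      omega
    have hLNmm : (202420242024 : Nat) % m = remN := by
      have : ((202420242024 : Nat) : Int) % (m : Int) = ((remN : Nat) : Int) := by
        rw [← hremc]; norm_num
      omega
    rcases hdisj with hS | hmeq
    · -- the loop closed a full cycle: scores repeat with period m
      have hper : ∀ k, pvS ts W (k + m) = pvS ts W k := by
        intro k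
        have := pvS_mul_period ts W hpos m hS 1 k
        rwa [one_mul] at this
      have hshift : ∀ i : Nat, pvsc ts W (lpN + i + 1) = pvsc ts W (i + 1) := by
        intro i
        unfold pvsc
        rw [show lpN + i + 1 = (i + 1) + q.toNat * m by omega,
          pvS_mul_period ts W hpos m hS q.toNat (i + 1)]
      have hmapsh : ((List.range remN).map (fun i => pvsc ts W (lpN + i + 1))).sum
          = pvTotal ts W remN := by
        unfold pvTotal
        apply congrArg List.sum
        apply List.map_congr_left
        intro i _
        exact hshift i
      rw [hmapsh]
      rw [pvTotal_periodic ts W m hm1 hper 202420242024, hLNdm, hLNmm]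
      have hqq : ((q.toNat : Nat) : Int) = q := Int.toNat_of_nonneg hqnn
      rw [hqq]
      ring
    · -- no cycle within the step budget: the remainder is empty
      have hmL : ((m : Nat) : Int) = (202420242024 : Int) := by
        rw [hmeq]; norm_num
      have hq1 : q = 1 := by
        rw [hq, hmL]
        exact Int.ediv_self (by norm_num)
      have hrem0 : remN = 0 := by
        rw [hremN, hmL]
        simp [Int.emod_self]
      rw [hrem0, hq1, hmeq]
      simp [pvTotal]
  -- ---------- B's value: pvTotal over the full loop count ----------
  have hB : (let period : Int := (ts.zip W).foldl (fun period tw =>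
        let p := PySem.Int.floordiv ((tw.2.length : Int)) (pygcd tw.1 ((tw.2.length : Int)))
        PySem.Int.floordiv (period * p) (pygcd period p)) 1
      let steps : Int := min period 202420242024
      let q := PySem.Int.floordiv 202420242024 steps
      let r := PySem.Int.mod 202420242024 steps
      let fin := (PySem.List.pyRange 1 (steps + 1) 1).foldl (fun (cp : Int × Int) k =>
        let sc := scoreBk ts W k
        (cp.1 + sc, if k ≤ r then cp.2 + sc else cp.2)) ((0 : Int), (0 : Int))
      q * fin.1 + fin.2) = pvTotal ts W 202420242024 := by
    have hne : ∀ tw ∈ ts.zip W, tw.2 ≠ [] := by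
      intro tw htw
      exact hpos tw.2 (List.of_mem_zip htw).2
    obtain ⟨hP1, -, hPdvd⟩ := period_fold (ts.zip W) hne 1 (le_refl 1)
    set P : Int := (ts.zip W).foldl (fun period tw =>
      let p := PySem.Int.floordiv ((tw.2.length : Int)) (pygcd tw.1 ((tw.2.length : Int)))
      PySem.Int.floordiv (period * p) (pygcd period p)) 1 with hPdef
    simp only []
    by_cases hc : P ≤ 202420242024
    · rw [min_eq_left hc]
      set PN : Nat := P.toNat with hPN
      have hPc : P = ((PN : Nat) : Int) := by omega
      have hPN1 : 1 ≤ PN := by omega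
      have hPpos : (0 : Int) < P := by omega
      have hq : PySem.Int.floordiv 202420242024 P = (202420242024 : Int) / P :=
        PySem.Int.floordiv_eq_ediv_of_pos hPpos
      have hrm : PySem.Int.mod 202420242024 P = (202420242024 : Int) % P :=
        PySem.Int.mod_eq_emod_of_pos hPpos
      set r : Int := (202420242024 : Int) % P with hrdef
      have hr0 : 0 ≤ r := Int.emod_nonneg _ (by omega)
      have hrP : r < P := Int.emod_lt_of_pos _ hPpos
      have hper : ∀ k, pvS ts W (k + PN) = pvS ts W k := by
        apply pvS_add_period ts W hpos
        intro i hit hiW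
        have hmem : ((ts[i]'hit, W[i]'hiW)) ∈ ts.zip W := by
          have : (ts.zip W)[i]'(by omega) = (ts[i]'hit, W[i]'hiW) := List.getElem_zip ..
          rw [← this]
          exact List.getElem_mem _
        have := hPdvd (ts[i]'hit, W[i]'hiW) hmem
        simpa [← hPc] using this
      rw [hq, hrm]
      rw [show P + 1 = ((PN : Nat) : Int) + 1 by omega]
      rw [bLoop_eq ts W hlenW r hr0 PN]
      have hminr : min PN r.toNat = r.toNat := by omega
      rw [hminr]
      rw [pvTotal_periodic ts W PN hPN1 hper 202420242024]
      have hq2 : (202420242024 : Int) / P = ((202420242024 / PN : Nat) : Int) := by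
        rw [hPc]
        push_cast [Int.natCast_ediv]
        norm_num
      have hrt : r.toNat = 202420242024 % PN := by
        have h2 : r = ((202420242024 % PN : Nat) : Int) := by
          rw [hrdef, hPc]
          push_cast [Int.natCast_emod]
          norm_num
        omega
      rw [hq2, hrt]
    · rw [min_eq_right (by omega : (202420242024 : Int) ≤ P)]
      rw [show (PySem.Int.floordiv 202420242024 202420242024) = 1 from by
        rw [PySem.Int.floordiv_eq_ediv_of_pos (by norm_num)]
        exact Int.ediv_self (by norm_num)]
      rw [show (PySem.Int.mod 202420242024 202420242024) = 0 from by
        rw [PySem.Int.mod_eq_emod_of_pos (by norm_num)]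
        exact Int.emod_self]
      rw [show ((202420242024 : Int) + 1) = (((202420242024 : Nat) : Int) + 1) by norm_num]
      rw [bLoop_eq ts W hlenW 0 (le_refl 0) 202420242024]
      have : min (202420242024 : Nat) ((0 : Int)).toNat = 0 := by simp
      rw [this]
      simp [pvTotal]
  exact hA.trans hB.symm

-- ===== VERDICT (by name: the statement is the Claim_ definition above) =====
theorem part2_spec : Claim_equal_part2 := by
  intro g _ hpre
  unfold Spec_part2
  exact part2_eq g hpre
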